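-- pv_equiv track=rewrite | github.com/dnstjr4567/cote | 5주차.py | solution
-- ===== SOURCE A (Python) =====
-- def solution(number):
--     answer = 0
--     sum = 0
--     for i in range(2,len(number)):
--         for j in range(1,i):
--             for k in range(j):
--                 sum = number[i]+number[j]+number[k]
--                 if sum == 0:
--                     answer+=1
--
--     return answer
-- ===== SOURCE B (Python) =====
-- def solution(number):
--     # O(n^2): fix the largest index i; while scanning j < i keep a counter of
--     # elements at indices k < j and look up how many equal -(number[i]+number[j]).
--     answer = 0
--     for i in range(len(number)):
--         seen = {}
--         for j in range(i):
--             answer += seen.get(-(number[i] + number[j]), 0)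
--             v = number[j]
--             seen[v] = seen.get(v, 0) + 1
--     return answer
-- ===== Notes on version B (the rewrite author's own statement) =====
-- stated objective: faster
-- what changed: B replaces A's O(n^3) triple index loop by fixing the largest index i and scanning j once while a hash counter of earlier elements answers how many k<j complete a zero-sum triple, giving O(n^2).
import Mathlib
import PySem

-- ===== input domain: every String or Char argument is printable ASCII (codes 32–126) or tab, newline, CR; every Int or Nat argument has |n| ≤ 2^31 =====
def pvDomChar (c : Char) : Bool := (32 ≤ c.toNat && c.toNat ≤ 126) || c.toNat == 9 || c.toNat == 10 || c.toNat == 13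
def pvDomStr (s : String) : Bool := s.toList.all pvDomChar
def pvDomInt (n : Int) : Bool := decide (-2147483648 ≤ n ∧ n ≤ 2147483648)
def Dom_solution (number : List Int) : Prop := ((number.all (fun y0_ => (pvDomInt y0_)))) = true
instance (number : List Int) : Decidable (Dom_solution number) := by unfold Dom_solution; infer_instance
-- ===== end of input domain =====

-- B replaces A's innermost index loop by a hash counter of earlier elements (O(n^3) → O(n^2)).

-- ===== PORT A =====
-- literal port of A's triple loop (the dead local `sum` does not affect the returned value)
def solution (number : List Int) : Int :=
  (PySem.List.pyRange 2 number.length).foldl (fun answer i =>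
    (PySem.List.pyRange 1 i).foldl (fun answer j =>
      (PySem.List.pyRange 0 j).foldl (fun answer k =>
        if PySem.List.pyGetD number i 0 + PySem.List.pyGetD number j 0
             + PySem.List.pyGetD number k 0 == 0 then answer + 1 else answer)
        answer)
      answer)
    0

-- ===== PORT B =====
def solution_alt (number : List Int) : Int :=
  (PySem.List.pyRange 0 number.length).foldl (fun answer i =>
    ((PySem.List.pyRange 0 i).foldl
      (fun (st : Int × PySem.Dict Int Int) j =>
        (st.1 + st.2.getD (-(PySem.List.pyGetD number i 0 + PySem.List.pyGetD number j 0)) 0,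
         st.2.insert (PySem.List.pyGetD number j 0)
           (st.2.getD (PySem.List.pyGetD number j 0) 0 + 1)))
      (answer, PySem.Dict.empty)).1)
    0

-- ===== PRECONDITION & SPEC =====
def Spec_solution (number : List Int) (out : Int) : Prop := out = solution_alt number
instance (number : List Int) (out : Int) : Decidable (Spec_solution number out) := by unfold Spec_solution; infer_instance

-- ===== CLAIM (what is proved, stated in full; the proofs are below) =====
def Claim_equal_solution : Prop := ∀ (number : List Int), Dom_solution number → Spec_solution number (solution number)

-- ===== LEMMAS AND PROOFS =====

-- element at (Int) index, as both ports read it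
def pvKey (number : List Int) (t : Int) : Int := PySem.List.pyGetD number t 0

-- the dict B has built after scanning indices 0..m-1
def pvDct (number : List Int) : Nat → PySem.Dict Int Int
  | 0 => PySem.Dict.empty
  | m+1 => (pvDct number m).insert (pvKey number m)
             ((pvDct number m).getD (pvKey number m) 0 + 1)

-- Σ_{j<m} #{k<j | number[k] = -(number[i]+number[j])}
def pvMSum (number : List Int) (i : Int) : Nat → Int
  | 0 => 0
  | m+1 => pvMSum number i m
      + (((List.range m).map (fun k : Nat => pvKey number (k : Int))).count (-(pvKey number i + pvKey number m)) : Int)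

theorem pvDct_getD (number : List Int) (m : Nat) (v : Int) :
    (pvDct number m).getD v 0 = (((List.range m).map (fun k : Nat => pvKey number (k : Int))).count v : Int) := by
  induction m with
  | zero => rfl
  | succ m ih =>
      rw [List.range_succ]
      simp only [pvDct, PySem.Dict.getD_insert, List.map_append, List.map_cons, List.map_nil,
        List.count_append, ih]
      split_ifs with h
      · subst h
        simp [ih]
      · have hne : (pvKey number m == v) = false := by simp [Ne.symm h]
        simp [List.count_cons, hne]

-- B's inner fold, fully characterised
theorem pvB_inner (number : List Int) (i : Int) (m : Nat) (a : Int) :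
    (PySem.List.pyRange 0 (m : Int)).foldl
      (fun (st : Int × PySem.Dict Int Int) j =>
        (st.1 + st.2.getD (-(PySem.List.pyGetD number i 0 + PySem.List.pyGetD number j 0)) 0,
         st.2.insert (PySem.List.pyGetD number j 0)
           (st.2.getD (PySem.List.pyGetD number j 0) 0 + 1)))
      (a, PySem.Dict.empty)
    = (a + pvMSum number i m, pvDct number m) := by
  induction m with
  | zero => simp [pvMSum, pvDct]
  | succ m ih =>
      have h : PySem.List.pyRange 0 ((m+1 : Nat) : Int)
          = PySem.List.pyRange 0 (m : Int) ++ [(m : Int)] := by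
        push_cast
        exact PySem.List.pyRange_one_succ_right (by omega)
      rw [h, List.foldl_append, ih]
      simp only [List.foldl_cons, List.foldl_nil, pvDct_getD, pvMSum, pvDct, pvKey]
      rw [Prod.mk.injEq]
      exact ⟨by ring, rfl⟩

-- A's innermost fold counts exactly that prefix count
theorem pvA_inner (number : List Int) (i : Int) (m : Nat) (a : Int) :
    (PySem.List.pyRange 0 (m : Int)).foldl
      (fun answer k =>
        if PySem.List.pyGetD number i 0 + PySem.List.pyGetD number (m : Int) 0
             + PySem.List.pyGetD number k 0 == 0 then answer + 1 else answer) a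
    = a + (((List.range m).map (fun k : Nat => pvKey number (k : Int))).count
             (-(pvKey number i + pvKey number (m : Int))) : Int) := by
  rw [PySem.List.foldl_count_if]
  congr 2
  rw [PySem.List.pyRange_zero_natCast, List.countP_map, List.count_eq_countP', List.countP_map]
  apply List.countP_congr
  intro k _
  simp only [Function.comp, pvKey, beq_iff_eq]
  omega

-- A's middle fold over j ∈ [1, m) equals pvMSum (the j = 0 term of pvMSum is 0)
theorem pvA_mid (number : List Int) (i : Int) (m : Nat) (a : Int) :
    (PySem.List.pyRange 1 (m : Int)).foldl
      (fun answer j =>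
        (PySem.List.pyRange 0 j).foldl
          (fun answer k =>
            if PySem.List.pyGetD number i 0 + PySem.List.pyGetD number j 0
                 + PySem.List.pyGetD number k 0 == 0 then answer + 1 else answer)
          answer) a
    = a + pvMSum number i m := by
  induction m with
  | zero => simp [pvMSum]
  | succ m ih =>
      cases m with
      | zero => simp [pvMSum]
      | succ m' =>
          have h : PySem.List.pyRange 1 ((m'+2 : Nat) : Int)
              = PySem.List.pyRange 1 ((m'+1 : Nat) : Int) ++ [((m'+1 : Nat) : Int)] := by
            have hc : ((m'+2 : Nat) : Int) = ((m'+1 : Nat) : Int) + 1 := by push_cast; ring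
            rw [hc]
            exact PySem.List.pyRange_one_succ_right (by push_cast; omega)
          rw [h, List.foldl_append, ih]
          have hstep := pvA_inner number i (m'+1) (a + pvMSum number i (m'+1))
          simp only [List.foldl_cons, List.foldl_nil]
          rw [hstep]
          push_cast [pvMSum]
          ring

-- both outer loops, as a sum of pvMSum terms
theorem pvOuter (number : List Int) (s : Int) (l : List Int)
    (hl : ∀ i ∈ l, 0 ≤ i) :
    l.foldl (fun answer i =>
      ((PySem.List.pyRange 0 i).foldl
        (fun (st : Int × PySem.Dict Int Int) j =>
          (st.1 + st.2.getD (-(PySem.List.pyGetD number i 0 + PySem.List.pyGetD number j 0)) 0,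
           st.2.insert (PySem.List.pyGetD number j 0)
             (st.2.getD (PySem.List.pyGetD number j 0) 0 + 1)))
        (answer, PySem.Dict.empty)).1) s
    = l.foldl (fun answer i => answer + pvMSum number i i.toNat) s := by
  induction l generalizing s with
  | nil => rfl
  | cons x xs ih =>
      have hx : 0 ≤ x := hl x (by simp)
      have hx' : x = ((x.toNat : Nat) : Int) := by omega
      have hstep := pvB_inner number x x.toNat s
      rw [← hx'] at hstep
      simp only [List.foldl_cons, hstep]
      exact ih _ (fun i hi => hl i (by simp [hi]))

theorem pvOuterA (number : List Int) (s : Int) (l : List Int)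
    (hl : ∀ i ∈ l, 0 ≤ i) :
    l.foldl (fun answer i =>
      (PySem.List.pyRange 1 i).foldl
        (fun answer j =>
          (PySem.List.pyRange 0 j).foldl
            (fun answer k =>
              if PySem.List.pyGetD number i 0 + PySem.List.pyGetD number j 0
                   + PySem.List.pyGetD number k 0 == 0 then answer + 1 else answer)
            answer) answer) s
    = l.foldl (fun answer i => answer + pvMSum number i i.toNat) s := by
  induction l generalizing s with
  | nil => rfl
  | cons x xs ih =>
      have hx : 0 ≤ x := hl x (by simp)
      have hx' : x = ((x.toNat : Nat) : Int) := by omega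
      have hstep := pvA_mid number x x.toNat s
      rw [← hx'] at hstep
      simp only [List.foldl_cons, hstep]
      exact ih _ (fun i hi => hl i (by simp [hi]))

-- ===== VERDICT (by name: the statement is the Claim_ definition above) =====
theorem solution_spec : Claim_equal_solution := by
  intro number _
  unfold Spec_solution solution solution_alt
  have hnn : ∀ (a : Int) (b : Int), ∀ i ∈ PySem.List.pyRange a b, a ≤ i := by
    intro a b i hi
    exact ((PySem.List.mem_pyRange_one).1 hi).1
  rw [pvOuterA number 0 _ (fun i hi => le_trans (by norm_num) (hnn 2 _ i hi)),
      pvOuter number 0 _ (fun i hi => hnn 0 _ i hi)]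
  -- the two ranges differ only in the i = 0 and i = 1 terms, both of which are 0
  rcases number with _ | ⟨x, _ | ⟨y, rest⟩⟩
  · rfl
  · simp only [List.length_singleton, Nat.cast_one]
    rw [show PySem.List.pyRange 0 1 = [0] from by decide,
        show PySem.List.pyRange 2 1 = ([] : List Int) from by decide]
    simp [pvMSum]
  · have hlen : ((x :: y :: rest).length : Int) = (rest.length : Int) + 2 := by
      simp; ring
    have h2 : (2 : Int) ≤ ((x :: y :: rest).length : Int) := by rw [hlen]; omega
    have h0 : PySem.List.pyRange 0 ((x :: y :: rest).length : Int)
        = 0 :: 1 :: PySem.List.pyRange 2 ((x :: y :: rest).length : Int) := by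
      rw [PySem.List.pyRange_one_cons (by omega), PySem.List.pyRange_one_cons (by omega)]
      norm_num
    rw [h0]
    simp [pvMSum]
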